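-- pv_equiv track=rewrite | github.com/ToheedAsghar/ProblemSolving | 1927B-FollowingTheString.py | traceString
-- ===== SOURCE A (Python) =====
-- def traceString(arr):
--     alphabets = "abcdefghijklmnopqrstuvwxyz"
--     j= 0          # to keep track of alphabets
--     dict = {}
--     n = len(arr)
--     retString = ""
--     for i in range(n):
--         if 0 == arr[i]:
--             dict[alphabets[j]] = dict.get(alphabets[j], 0) + 1
--             retString += alphabets[j]
--             j += 1
--         else:
--             for key,value in dict.items():
--                 if value == arr[i]:
--                     retString += key
--                     dict[key] += 1
--                     break
--     return retString
-- ===== SOURCE B (Python) =====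
-- def traceString(arr):
--     # Bucket map: current count -> list of letter indices sitting at that count.
--     # Matching a count pops the smallest index from its bucket (no scan over all letters).
--     buckets = {}
--     j = 0
--     out = []
--     for c in arr:
--         if c == 0:
--             out.append("abcdefghijklmnopqrstuvwxyz"[j])
--             buckets.setdefault(1, []).append(j)
--             j += 1
--         else:
--             b = buckets.get(c)
--             if b:
--                 i = min(b)
--                 b.remove(i)
--                 out.append(chr(97 + i))
--                 buckets.setdefault(c + 1, []).append(i)
--     return "".join(out)
-- ===== Notes on version B (the rewrite author's own statement) =====
-- stated objective: faster
-- what changed: A rescans the whole letter->count dict for the first letter with the wanted count on every step; B keeps a buckets map from count value to the letter indices currently at that count and pops the minimum index, moving it to the next bucket, so no scan over all letters is needed.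
import Mathlib
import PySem

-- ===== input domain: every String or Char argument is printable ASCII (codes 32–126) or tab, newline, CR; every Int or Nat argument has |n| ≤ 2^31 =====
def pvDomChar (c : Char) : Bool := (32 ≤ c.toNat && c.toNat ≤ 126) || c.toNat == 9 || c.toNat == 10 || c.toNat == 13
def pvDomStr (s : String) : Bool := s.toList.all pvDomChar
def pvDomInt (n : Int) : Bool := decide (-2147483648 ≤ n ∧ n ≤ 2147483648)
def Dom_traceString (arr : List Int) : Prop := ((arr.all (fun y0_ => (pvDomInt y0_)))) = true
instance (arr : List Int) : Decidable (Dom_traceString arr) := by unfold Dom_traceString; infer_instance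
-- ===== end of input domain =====

-- B replaces A's linear scan of the letter-count dict with a buckets map (count -> letter
-- indices at that count), popping the minimum index; same return value, different bookkeeping.


-- ===== PORT A =====
def traceAStep (st : Nat × PySem.Dict Char Int × List Char) (c : Int) :
    Nat × PySem.Dict Char Int × List Char :=
  match st with
  | (j, d, ret) =>
    if 0 == c then
      match PySem.List.pyGet? "abcdefghijklmnopqrstuvwxyz".toList (j : Int) with
      | some ch => (j + 1, d.insert ch (d.getD ch 0 + 1), ret ++ [ch])
      | none => (j, d, ret)  -- IndexError in Python (27th new letter); excluded by Pre_
    else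
      match d.items.find? (fun kv => kv.2 == c) with
      | some kv => (j, d.insert kv.1 (kv.2 + 1), ret ++ [kv.1])
      | none => (j, d, ret)

def traceString (arr : List Int) : String :=
  String.ofList (arr.foldl traceAStep (0, PySem.Dict.empty, [])).2.2

-- ===== PORT B =====
def traceBStep (st : PySem.Dict Int (List Nat) × Nat × List Char) (c : Int) :
    PySem.Dict Int (List Nat) × Nat × List Char :=
  match st with
  | (bk, j, out) =>
    if c == 0 then
      match PySem.List.pyGet? "abcdefghijklmnopqrstuvwxyz".toList (j : Int) with
      | some ch => (PySem.Dict.modify bk 1 [] (· ++ [j]), j + 1, out ++ [ch])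
      | none => (bk, j, out)  -- IndexError in Python (27th new letter); excluded by Pre_
    else
      let b := bk.getD c []
      if b.isEmpty then (bk, j, out)
      else
        match PySem.List.min? b (fun x => x) with
        | some i =>
          match PySem.List.remove? b i with
          | some b' => (PySem.Dict.modify (bk.insert c b') (c + 1) [] (· ++ [i]), j,
                        out ++ [Char.ofNat (97 + i)])
          | none => (bk, j, out)  -- unreachable: min is a member
        | none => (bk, j, out)  -- unreachable: b nonempty

def traceString_alt (arr : List Int) : String :=
  String.ofList (arr.foldl traceBStep (PySem.Dict.empty, 0, [])).2.2

-- ===== PRECONDITION & SPEC =====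
-- Pre_ excludes inputs with more than 26 zeros, on which both Pythons raise IndexError
-- indexing past 'z' in the alphabet string.
def Pre_traceString (arr : List Int) : Prop := arr.count 0 ≤ 26
instance (arr : List Int) : Decidable (Pre_traceString arr) := by unfold Pre_traceString; infer_instance
def pvWitness_traceString : List Int := [0, 0, 1, 1, 2, 7, 2]

def Spec_traceString (arr : List Int) (out : String) : Prop := out = traceString_alt arr
instance (arr : List Int) (out : String) : Decidable (Spec_traceString arr out) := by unfold Spec_traceString; infer_instance

-- ===== CLAIM (what is proved, stated in full; the proofs are below) =====
def Claim_equal_traceString : Prop := ∀ (arr : List Int), Dom_traceString arr → Pre_traceString arr → Spec_traceString arr (traceString arr)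

-- ===== LEMMAS AND PROOFS =====

-- letter with index i
def pvChr (i : Nat) : Char := Char.ofNat (97 + i)

-- the simulation invariant: cnt i is the current count of letter i
def pvInv (sA : Nat × PySem.Dict Char Int × List Char)
    (sB : PySem.Dict Int (List Nat) × Nat × List Char) (cnt : Nat → Int) : Prop :=
  sB.2.1 = sA.1 ∧ sB.2.2 = sA.2.2 ∧ sA.1 ≤ 26 ∧
  sA.2.1.items = (List.range sA.1).map (fun i => (pvChr i, cnt i)) ∧
  (∀ i < sA.1, 1 ≤ cnt i) ∧
  (∀ (v : Int) (i : Nat), i ∈ sB.1.getD v [] ↔ (i < sA.1 ∧ cnt i = v)) ∧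
  (∀ v : Int, (sB.1.getD v []).Nodup)

theorem pvAlph_get : ∀ j, j < 26 → "abcdefghijklmnopqrstuvwxyz".toList[j]? = some (pvChr j) := by decide

theorem pvAlph_26 : "abcdefghijklmnopqrstuvwxyz".toList[(26:Nat)]? = none := by decide

theorem pvChr_inj : ∀ a, a < 26 → ∀ b, b < 26 → pvChr a = pvChr b → a = b := by decide

-- find? over range finds the least index satisfying p
theorem find?_range_char (p : Nat → Bool) (j i0 : Nat) (h : (List.range j).find? p = some i0) :
    i0 < j ∧ p i0 = true ∧ ∀ i < i0, ¬ p i = true := by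
  rw [List.find?_eq_some_iff_append] at h
  obtain ⟨hp, as, bs, heq, hall⟩ := h
  have hlen : as.length < j := by
    have := congrArg List.length heq; simp at this; omega
  have hi0 : i0 = as.length := by
    have h2 := congrArg (fun l => l[as.length]?) heq
    simp [List.getElem?_range hlen] at h2
    omega
  subst hi0
  refine ⟨hlen, hp, ?_⟩
  intro i hi hpi
  have hmem : i ∈ as := by
    have h2 := congrArg (fun l => l[i]?) heq
    simp [List.getElem?_range (by omega : i < j), List.getElem?_append_left hi] at h2
    exact List.mem_of_getElem? h2.symm
  exact absurd hpi (by simpa using hall i hmem)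

theorem pvStep_inv (sA : Nat × PySem.Dict Char Int × List Char)
    (sB : PySem.Dict Int (List Nat) × Nat × List Char) (cnt : Nat → Int) (c : Int)
    (h : pvInv sA sB cnt) : ∃ cnt', pvInv (traceAStep sA c) (traceBStep sB c) cnt' := by
  obtain ⟨jA, d, retA⟩ := sA
  obtain ⟨bk, j, ret⟩ := sB
  obtain ⟨hj, hout, hle, hitems, hpos, hmem, hnd⟩ := h
  dsimp only at hj hout hle hitems hpos hmem hnd
  subst hj; subst hout
  by_cases hc : c = 0
  · -- new letter
    subst hc
    by_cases hj26 : j < 26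
    · have hkeys : d.keys = (List.range j).map pvChr := by
        show d.items.map (·.1) = _
        rw [hitems, List.map_map]; rfl
      have hcont : d.contains (pvChr j) = false := by
        rw [← Bool.not_eq_true, PySem.Dict.contains_iff_mem_keys, hkeys]
        simp only [List.mem_map, List.mem_range, not_exists, not_and]
        intro i hi hip
        have := pvChr_inj i (by omega) j hj26 hip
        omega
      have hget : PySem.List.pyGet? "abcdefghijklmnopqrstuvwxyz".toList (j : Int)
          = some (pvChr j) := by
        rw [PySem.List.pyGet?_natCast]; exact pvAlph_get j hj26
      have hA : traceAStep (j, d, ret) 0 = (j + 1, d.insert (pvChr j) 1, ret ++ [pvChr j]) := by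
        simp only [traceAStep, hget]
        simp [PySem.Dict.getD_of_not_contains (d := d) (d0 := 0) (h := hcont)]
      have hB : traceBStep (bk, j, ret) 0
          = (PySem.Dict.modify bk 1 [] (· ++ [j]), j + 1, ret ++ [pvChr j]) := by
        simp only [traceBStep, hget]
        simp
      refine ⟨fun i => if i = j then 1 else cnt i, ?_⟩
      rw [hA, hB]
      refine ⟨rfl, rfl, by omega, ?_, ?_, ?_, ?_⟩
      · -- items
        show (d.insert (pvChr j) 1).items = _
        rw [PySem.Dict.items_insert_of_not_contains d 1 hcont, hitems, List.range_succ,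
          List.map_append]
        congr 1
        · exact List.map_congr_left fun i hi => by
            simp only [List.mem_range] at hi
            simp [Nat.ne_of_lt hi]
        · simp
      · intro i hi
        dsimp only at hi ⊢
        by_cases hij : i = j
        · simp [hij]
        · simp only [if_neg hij]; exact hpos i (by omega)
      · intro v i
        show i ∈ (PySem.Dict.modify bk 1 [] (· ++ [j])).getD v [] ↔ _
        rw [PySem.Dict.getD_modify]
        by_cases hv : v = 1
        · subst hv
          rw [if_pos rfl]
          simp only [List.mem_append, List.mem_singleton, hmem]
          constructor
          · rintro (⟨hi, hci⟩ | rfl)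
            · exact ⟨by omega, by simp [Nat.ne_of_lt hi, hci]⟩
            · exact ⟨by omega, by simp⟩
          · rintro ⟨hi, hci⟩
            by_cases hij : i = j
            · right; exact hij
            · left; simp only [if_neg hij] at hci; exact ⟨by omega, hci⟩
        · simp only [if_neg hv, hmem]
          constructor
          · rintro ⟨hi, hci⟩
            exact ⟨by omega, by simp [Nat.ne_of_lt hi, hci]⟩
          · rintro ⟨hi, hci⟩
            by_cases hij : i = j
            · subst hij; simp at hci; omega
            · simp only [if_neg hij] at hci; exact ⟨by omega, hci⟩
      · intro v
        show ((PySem.Dict.modify bk 1 [] (· ++ [j])).getD v []).Nodup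
        rw [PySem.Dict.getD_modify]
        by_cases hv : v = 1
        · subst hv
          rw [if_pos rfl]
          simp only [List.nodup_append]
          refine ⟨hnd 1, by simp, ?_⟩
          intro x hx
          have := (hmem 1 x).mp hx
          simp only [List.mem_singleton]
          omega
        · simp only [if_neg hv]; exact hnd v
    · -- j = 26: IndexError in Python (outside Pre_); both ports keep the state
      have hj' : j = 26 := by omega
      subst hj'
      have hget : PySem.List.pyGet? "abcdefghijklmnopqrstuvwxyz".toList ((26 : Nat) : Int)
          = none := by
        rw [PySem.List.pyGet?_natCast]; exact pvAlph_26
      refine ⟨cnt, ?_⟩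
      have hA : traceAStep (26, d, ret) 0 = (26, d, ret) := by
        simp only [traceAStep, hget]; simp
      have hB : traceBStep (bk, 26, ret) 0 = (bk, 26, ret) := by
        simp only [traceBStep, hget]; simp
      rw [hA, hB]
      exact ⟨rfl, rfl, hle, hitems, hpos, hmem, hnd⟩
  · -- match an existing count
    have hfind : d.items.find? (fun kv => kv.2 == c)
        = ((List.range j).find? (fun i => cnt i == c)).map (fun i => (pvChr i, cnt i)) := by
      rw [hitems, List.find?_map]; rfl
    by_cases hex : ∃ i, i < j ∧ cnt i = c
    · obtain ⟨iw, hiwj, hiwc⟩ := hex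
      have hsome : ((List.range j).find? (fun i => cnt i == c)).isSome :=
        List.find?_isSome.mpr ⟨iw, List.mem_range.mpr hiwj, by simp [hiwc]⟩
      obtain ⟨i0, hi0eq⟩ := Option.isSome_iff_exists.mp hsome
      obtain ⟨hi0j, hi0c, hi0min⟩ := find?_range_char _ j i0 hi0eq
      have hc0 : cnt i0 = c := by simpa using hi0c
      have hi0b : i0 ∈ bk.getD c [] := (hmem c i0).mpr ⟨hi0j, hc0⟩
      have hbne : (bk.getD c []).isEmpty = false := by
        rw [List.isEmpty_eq_false_iff_exists_mem]; exact ⟨i0, hi0b⟩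
      have hmin : PySem.List.min? (bk.getD c []) (fun x => x) = some i0 := by
        have hmin_ne : PySem.List.min? (bk.getD c []) (fun x => x) ≠ none := fun hnil => by
          rw [PySem.List.min?_eq_none_iff] at hnil
          rw [hnil] at hi0b; simp at hi0b
        obtain ⟨m, hm⟩ := Option.ne_none_iff_exists'.mp hmin_ne
        have hmmem := PySem.List.min?_mem hm
        obtain ⟨hmj, hmc⟩ := (hmem c m).mp hmmem
        have h1 : m ≤ i0 := PySem.List.min?_isMin hm i0 hi0b
        have h2 : i0 ≤ m := by
          by_contra hlt
          exact hi0min m (by omega) (by simp [hmc])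
        have : m = i0 := by omega
        rw [hm, this]
      have hrem : PySem.List.remove? (bk.getD c []) i0
          = some ((bk.getD c []).erase i0) :=
        PySem.List.remove?_eq_some_erase _ i0 hi0b
      have hA : traceAStep (j, d, ret) c
          = (j, d.insert (pvChr i0) (cnt i0 + 1), ret ++ [pvChr i0]) := by
        simp only [traceAStep, hfind, hi0eq]
        rw [show ((0 : Int) == c) = false by simp [Ne.symm hc]]
        simp
      have hB : traceBStep (bk, j, ret) c
          = (PySem.Dict.modify (bk.insert c ((bk.getD c []).erase i0)) (c + 1) [] (· ++ [i0]),
             j, ret ++ [pvChr i0]) := by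
        simp only [traceBStep]
        rw [show (c == 0) = false by simp [hc]]
        simp only [Bool.false_eq_true, if_false, hbne, hmin, hrem]
        rfl
      have hcontA : d.contains (pvChr i0) = true := by
        rw [PySem.Dict.contains_iff_mem_keys]
        show pvChr i0 ∈ d.items.map (·.1)
        rw [hitems, List.map_map]
        exact List.mem_map.mpr ⟨i0, List.mem_range.mpr hi0j, rfl⟩
      refine ⟨fun i => if i = i0 then c + 1 else cnt i, ?_⟩
      rw [hA, hB]
      refine ⟨rfl, rfl, hle, ?_, ?_, ?_, ?_⟩
      · -- items
        show (d.insert (pvChr i0) (cnt i0 + 1)).items = _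
        rw [PySem.Dict.items_insert_of_contains d (cnt i0 + 1) hcontA, hitems, List.map_map]
        refine List.map_congr_left fun i hi => ?_
        simp only [List.mem_range] at hi
        by_cases hii : i = i0
        · subst hii
          simp [hc0]
        · have hne : (pvChr i == pvChr i0) = false := by
            simp only [beq_eq_false_iff_ne, ne_eq]
            intro hx
            exact hii (pvChr_inj i (by omega) i0 (by omega) hx)
          simp [Function.comp, hne, hii]
      · intro i hi
        dsimp only
        by_cases hii : i = i0
        · have := hpos i0 hi0j; simp [hii]; omega
        · simp only [if_neg hii]; exact hpos i hi
      · intro v i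
        show i ∈ (PySem.Dict.modify (bk.insert c ((bk.getD c []).erase i0)) (c + 1) []
            (· ++ [i0])).getD v [] ↔ _
        have hcc : ¬ ((c : Int) + 1 = c) := by omega
        simp only [PySem.Dict.getD_modify, PySem.Dict.getD_insert]
        by_cases hv1 : v = c + 1
        · subst hv1
          rw [if_pos rfl, if_neg hcc]
          simp only [List.mem_append, List.mem_singleton, hmem]
          constructor
          · rintro (⟨hi', hci⟩ | rfl)
            · have hii : i ≠ i0 := fun hx => by rw [hx, hc0] at hci; omega
              exact ⟨hi', by simp [hii, hci]⟩
            · exact ⟨hi0j, by simp⟩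
          · rintro ⟨hi', hci⟩
            by_cases hii : i = i0
            · right; exact hii
            · left
              rw [if_neg hii] at hci
              exact ⟨hi', hci⟩
        · rw [if_neg hv1]
          by_cases hv2 : v = c
          · subst hv2
            rw [if_pos rfl]
            simp only [(hnd v).mem_erase_iff, hmem]
            constructor
            · rintro ⟨hii, hij', hci⟩
              exact ⟨hij', by simp [hii, hci]⟩
            · rintro ⟨hij', hci⟩
              by_cases hii : i = i0
              · subst hii
                rw [if_pos rfl] at hci
                exact absurd hci (by omega)
              · rw [if_neg hii] at hci
                exact ⟨hii, hij', hci⟩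
          · rw [if_neg hv2]
            simp only [hmem]
            constructor
            · rintro ⟨hi', hci⟩
              have hii : i ≠ i0 := fun hx => by rw [hx, hc0] at hci; exact hv2 hci.symm
              exact ⟨hi', by simp [hii, hci]⟩
            · rintro ⟨hi', hci⟩
              by_cases hii : i = i0
              · subst hii
                rw [if_pos rfl] at hci
                exact absurd hci.symm hv1
              · rw [if_neg hii] at hci
                exact ⟨hi', hci⟩
      · intro v
        show ((PySem.Dict.modify (bk.insert c ((bk.getD c []).erase i0)) (c + 1) []
            (· ++ [i0])).getD v []).Nodup
        have hcc : ¬ ((c : Int) + 1 = c) := by omega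
        simp only [PySem.Dict.getD_modify, PySem.Dict.getD_insert]
        by_cases hv1 : v = c + 1
        · subst hv1
          rw [if_pos rfl, if_neg hcc]
          simp only [List.nodup_append]
          refine ⟨hnd (c + 1), by simp, ?_⟩
          intro x hx b hb
          obtain ⟨hx1, hx2⟩ := (hmem (c + 1) x).mp hx
          simp only [List.mem_singleton] at hb
          subst hb
          intro hxi
          rw [hxi, hc0] at hx2
          omega
        · rw [if_neg hv1]
          by_cases hv2 : v = c
          · rw [if_pos hv2]
            exact (hnd c).erase i0
          · rw [if_neg hv2]
            exact hnd v
    · -- no letter has this count: both sides keep the state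
      have hex' : ∀ i, i < j → cnt i ≠ c := fun i h1 h2 => hex ⟨i, h1, h2⟩
      have hnone : (List.range j).find? (fun i => cnt i == c) = none :=
        List.find?_eq_none.mpr fun x hx => by
          simp only [beq_eq_false_iff_ne, ne_eq, Bool.not_eq_true, beq_eq_false_iff_ne]
          exact hex' x (List.mem_range.mp hx)
      have hbnil : bk.getD c [] = [] := by
        rw [List.eq_nil_iff_forall_not_mem]
        intro i hi
        obtain ⟨h1, h2⟩ := (hmem c i).mp hi
        exact hex' i h1 h2
      have hA : traceAStep (j, d, ret) c = (j, d, ret) := by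
        simp only [traceAStep, hfind, hnone]
        rw [show ((0 : Int) == c) = false by simp [Ne.symm hc]]
        simp
      have hB : traceBStep (bk, j, ret) c = (bk, j, ret) := by
        simp only [traceBStep, hbnil]
        rw [show (c == 0) = false by simp [hc]]
        simp
      exact ⟨cnt, by rw [hA, hB]; exact ⟨rfl, rfl, hle, hitems, hpos, hmem, hnd⟩⟩


theorem pvFold_inv (arr : List Int) (sA : Nat × PySem.Dict Char Int × List Char)
    (sB : PySem.Dict Int (List Nat) × Nat × List Char) (cnt : Nat → Int)
    (h : pvInv sA sB cnt) :
    ∃ cnt', pvInv (arr.foldl traceAStep sA) (arr.foldl traceBStep sB) cnt' := by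
  induction arr generalizing sA sB cnt with
  | nil => exact ⟨cnt, h⟩
  | cons c t ih =>
    obtain ⟨cnt', h'⟩ := pvStep_inv sA sB cnt c h
    exact ih _ _ _ h'

-- ===== VERDICT (by name: the statement is the Claim_ definition above) =====
theorem traceString_spec : Claim_equal_traceString := by
  intro arr _ _
  unfold Spec_traceString traceString traceString_alt
  obtain ⟨cnt', h⟩ := pvFold_inv arr (0, PySem.Dict.empty, []) (PySem.Dict.empty, 0, [])
    (fun _ => 0) (by
      refine ⟨rfl, rfl, by norm_num, rfl, by omega, ?_, ?_⟩
      · intro v i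
        simp [PySem.Dict.getD_empty]
      · intro v
        simp [PySem.Dict.getD_empty])
  rw [h.2.1]
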